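-- pv_equiv track=rewrite | github.com/daniel-reich/turbo-robot | TZXG9RfcZ7T3o43QF_19.py | same_length
-- ===== SOURCE A (Python) =====
-- def same_length(txt):
--   arr = [0]
--   for i in range(1,len(txt)):
--     if txt[i] != txt[i-1]:
--       arr.append(i)
--   arr.append(len(txt))
--   if len(arr)%2 == 0: return False
--   for i in range(1,len(arr),2):
--     if arr[i] - arr[i-1] != arr[i+1] - arr[i]:
--       return False
--   return True
-- ===== SOURCE B (Python) =====
-- def same_length(txt):
--     # two-pointer in-place scan: consume runs pairwise, no intermediate list
--     n = len(txt)
--     if n == 0: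
--         return False
--
--     def run_end(i):
--         j = i + 1
--         while j < n and txt[j] == txt[i]:
--             j += 1
--         return j
--
--     i = 0
--     while i < n:
--         j = run_end(i)
--         if j == n:
--             return False
--         m = run_end(j)
--         if m - j != j - i:
--             return False
--         i = m
--     return True
-- ===== Notes on version B (the rewrite author's own statement) =====
-- stated objective: faster
-- what changed: B replaces A's two-stage boundary-index list (collect all change positions, then compare index differences) with a two-pointer in-place scan that consumes runs pairwise directly from the string, building no intermediate list and returning at the first unequal pair.
import Mathlib
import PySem

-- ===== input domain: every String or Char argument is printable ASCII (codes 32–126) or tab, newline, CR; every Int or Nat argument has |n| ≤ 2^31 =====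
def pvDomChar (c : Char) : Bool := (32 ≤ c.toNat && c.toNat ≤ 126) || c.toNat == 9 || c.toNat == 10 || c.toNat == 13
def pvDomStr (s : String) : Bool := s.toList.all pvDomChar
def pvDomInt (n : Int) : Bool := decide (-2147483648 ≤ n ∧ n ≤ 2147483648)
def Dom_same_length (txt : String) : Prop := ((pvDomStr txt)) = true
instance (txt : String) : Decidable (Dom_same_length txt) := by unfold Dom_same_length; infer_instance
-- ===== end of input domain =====

-- B replaces A's boundary-index list and second index-arithmetic pass by a two-pointer scan
-- consuming runs pairwise in place, with no intermediate list; objective: faster (no intermediate list, early exit; speedup measured).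

-- ===== PORT A =====
def same_length (txt : String) : Bool :=
  let l := txt.toList
  let n : Int := PySem.Str.len txt
  let arr : List Int := (PySem.List.pyRange 1 n 1).foldl
      (fun arr i =>
        if PySem.List.pyGetD l i ' ' ≠ PySem.List.pyGetD l (i - 1) ' ' then arr ++ [i] else arr)
      [0]
  let arr2 := arr ++ [n]
  if PySem.Int.mod ((arr2.length : Int)) 2 = 0 then false
  else (PySem.List.pyRange 1 ((arr2.length : Int)) 2).foldl
      (fun ok i =>
        if PySem.List.pyGetD arr2 i 0 - PySem.List.pyGetD arr2 (i - 1) 0 ≠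
            PySem.List.pyGetD arr2 (i + 1) 0 - PySem.List.pyGetD arr2 i 0 then false else ok)
      true

-- ===== PORT B =====
-- Source B's inner 'while j < n and txt[j] == txt[i]: j += 1' (c is the fixed char txt[i])
def runGo (s : List Char) (c : Char) (j : Nat) : Nat :=
  if h : j < s.length then
    if s.getD j ' ' = c then runGo s c (j + 1) else j
  else j
termination_by s.length - j

-- the inner loop never moves its pointer backwards (cited by bLoop's decreasing_by)
theorem runGo_ge (s : List Char) (c : Char) (j : Nat) : j ≤ runGo s c j := by
  unfold runGo
  split
  · split
    · exact le_trans (by omega) (runGo_ge s c (j + 1))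
    · exact le_rfl
  · exact le_rfl
termination_by s.length - j

-- Source B's run_end
def runEnd (s : List Char) (i : Nat) : Nat := runGo s (s.getD i ' ') (i + 1)

-- Source B's outer 'while i < n' loop
def bLoop (s : List Char) (i : Nat) : Bool :=
  if h : i < s.length then
    let j := runEnd s i
    if j = s.length then false
    else
      let m := runEnd s j
      if m - j ≠ j - i then false
      else bLoop s m
  else true
termination_by s.length - i
decreasing_by
  have h1 : i + 1 ≤ runEnd s i := runGo_ge s (s.getD i ' ') (i + 1)
  have h2 : runEnd s i + 1 ≤ runEnd s (runEnd s i) := runGo_ge s (s.getD (runEnd s i) ' ') (runEnd s i + 1)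
  omega

def same_length_alt (txt : String) : Bool :=
  let n := txt.toList.length
  if n = 0 then false else bLoop txt.toList 0

-- ===== PRECONDITION & SPEC =====
def Spec_same_length (txt : String) (out : Bool) : Prop := out = same_length_alt txt
instance (txt : String) (out : Bool) : Decidable (Spec_same_length txt out) := by unfold Spec_same_length; infer_instance

-- ===== CLAIM (what is proved, stated in full; the proofs are below) =====
def Claim_equal_same_length : Prop := ∀ (txt : String), Dom_same_length txt → Spec_same_length txt (same_length txt)

-- ===== LEMMAS AND PROOFS =====

-- run lengths of a character list (the common description both ports are reduced to)
def goRuns (c : Char) (n : Int) : List Char → List Int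
  | [] => [n]
  | d :: t => if d = c then goRuns c (n + 1) t else n :: goRuns d 1 t

def runsOf : List Char → List Int
  | [] => []
  | c :: t => goRuns c 1 t

def pairsAllEq : List Int → Bool
  | a :: b :: t => (a == b) && pairsAllEq t
  | _ => true

-- the common value both programs compute on a NONEMPTY list
def ch (l : List Char) : Bool :=
  if (runsOf l).length % 2 = 0 then pairsAllEq (runsOf l) else false

def canon (l : List Char) : Bool := if l = [] then false else ch l

-- partial sums: sums x [k1, k2, …] = [x, x+k1, x+k1+k2, …]
def sums (x : Int) : List Int → List Int
  | [] => [x]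
  | a :: t => x :: sums (x + a) t

-- boundary positions, Nat-indexed: j with l[j+1] ≠ l[j]
def ABnds (l : List Char) : List Nat :=
  (List.range (l.length - 1)).filter (fun j => decide (l.getD (j + 1) ' ' ≠ l.getD j ' '))

-- A's code with String length replaced by its list form (definitionally equal to same_length)
def Abody (l : List Char) : Bool :=
  let n : Int := (l.length : Int)
  let arr : List Int := (PySem.List.pyRange 1 n 1).foldl
      (fun arr i =>
        if PySem.List.pyGetD l i ' ' ≠ PySem.List.pyGetD l (i - 1) ' ' then arr ++ [i] else arr)
      [0]
  let arr2 := arr ++ [n]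
  if PySem.Int.mod ((arr2.length : Int)) 2 = 0 then false
  else (PySem.List.pyRange 1 ((arr2.length : Int)) 2).foldl
      (fun ok i =>
        if PySem.List.pyGetD arr2 i 0 - PySem.List.pyGetD arr2 (i - 1) 0 ≠
            PySem.List.pyGetD arr2 (i + 1) 0 - PySem.List.pyGetD arr2 i 0 then false else ok)
      true

theorem goRuns_ne_nil (c : Char) (n : Int) (l : List Char) : goRuns c n l ≠ [] := by
  induction l generalizing c n with
  | nil => simp [goRuns]
  | cons d t ih =>
    by_cases hd : d = c <;> simp [goRuns, hd, ih]

theorem runsOf_ne_nil (l : List Char) (h : l ≠ []) : runsOf l ≠ [] := by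
  cases l with
  | nil => exact absurd rfl h
  | cons c t => exact goRuns_ne_nil c 1 t

theorem goRuns_replicate (j : Nat) (c : Char) (n : Int) (s : List Char)
    (hs : s.head? ≠ some c) :
    goRuns c n (List.replicate j c ++ s) = (n + j) :: runsOf s := by
  induction j generalizing n with
  | zero =>
    cases s with
    | nil => simp [goRuns, runsOf]
    | cons d t =>
      have hd : d ≠ c := by simpa using hs
      simp [goRuns, runsOf, hd]
  | succ j ih =>
    simp only [List.replicate_succ, List.cons_append, goRuns]
    rw [ih (n + 1)]
    have : n + 1 + (j : Int) = n + ((j : Nat) + 1 : Nat) := by push_cast; ring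
    rw [this]
    simp

theorem runsOf_replicate (k : Nat) (c : Char) (s : List Char) (hk : 1 ≤ k)
    (hs : s.head? ≠ some c) :
    runsOf (List.replicate k c ++ s) = ((k : Int)) :: runsOf s := by
  obtain ⟨k', rfl⟩ : ∃ k', k = k' + 1 := ⟨k - 1, by omega⟩
  simp only [List.replicate_succ, List.cons_append, runsOf]
  rw [goRuns_replicate k' c 1 s hs]
  have : (1 : Int) + (k' : Int) = ((k' + 1 : Nat) : Int) := by push_cast; ring
  rw [this]
  rfl

theorem ABnds_replicate (k : Nat) (c : Char) (s : List Char) (hk : 1 ≤ k)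
    (hs : s.head? ≠ some c) :
    ABnds (List.replicate k c ++ s) =
      if s = [] then [] else (k - 1) :: (ABnds s).map (· + k) := by
  have hlen : (List.replicate k c ++ s).length - 1 = (k - 1) + s.length := by
    simp [List.length_append]; omega
  have hgetL : ∀ j, j < k → (List.replicate k c ++ s).getD j ' ' = c := by
    intro j hj
    rw [List.getD_eq_getElem?_getD, List.getElem?_append_left (by simpa using hj)]
    simp [hj]
  have hgetR : ∀ i, (List.replicate k c ++ s).getD (k + i) ' ' = s.getD i ' ' := by
    intro i
    rw [List.getD_eq_getElem?_getD, List.getElem?_append_right (by simp)]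
    simp [List.getD_eq_getElem?_getD]
  unfold ABnds
  rw [hlen, List.range_add, List.filter_append, List.filter_map]
  have h1 : (List.range (k - 1)).filter
      (fun j => decide ((List.replicate k c ++ s).getD (j + 1) ' ' ≠ (List.replicate k c ++ s).getD j ' ')) = [] := by
    rw [List.filter_eq_nil_iff]
    intro j hj
    rw [List.mem_range] at hj
    rw [hgetL j (by omega), hgetL (j + 1) (by omega)]
    simp
  rw [h1, List.nil_append]
  cases s with
  | nil => simp
  | cons d t =>
    have hd : d ≠ c := by simpa using hs
    rw [if_neg (by simp)]
    have hlen2 : (d :: t).length = t.length + 1 := by simp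
    rw [hlen2, List.range_succ_eq_map, List.filter_cons]
    have h0 : ((fun j => decide ((List.replicate k c ++ d :: t).getD (j + 1) ' ' ≠ (List.replicate k c ++ d :: t).getD j ' ')) ∘ (fun x => k - 1 + x)) 0 = true := by
      simp only [Function.comp_apply]
      rw [decide_eq_true_iff]
      rw [show k - 1 + 0 + 1 = k + 0 from by omega, hgetR 0, hgetL (k - 1 + 0) (by omega)]
      simpa using hd
    rw [h0, if_pos rfl]
    simp only [List.map_cons]
    have htail : List.map (fun x => k - 1 + x)
        (List.filter
          ((fun j => decide ((List.replicate k c ++ d :: t).getD (j + 1) ' ' ≠ (List.replicate k c ++ d :: t).getD j ' ')) ∘ fun x => k - 1 + x)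
          (List.map Nat.succ (List.range t.length))) =
        List.map (fun x => x + k)
          (List.filter (fun j => decide ((d :: t).getD (j + 1) ' ' ≠ (d :: t).getD j ' '))
            (List.range (t.length + 1 - 1))) := by
      rw [List.filter_map, List.map_map]
      rw [show t.length + 1 - 1 = t.length from rfl]
      rw [List.filter_congr (q := fun j => decide ((d :: t).getD (j + 1) ' ' ≠ (d :: t).getD j ' '))
          (fun j hj => by
            show decide _ = decide _
            rw [decide_eq_decide]
            show (List.replicate k c ++ d :: t).getD (k - 1 + (j + 1) + 1) ' ' ≠ (List.replicate k c ++ d :: t).getD (k - 1 + (j + 1)) ' ' ↔ _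
            rw [show k - 1 + (j + 1) + 1 = k + (j + 1) from by omega, hgetR (j + 1),
                show k - 1 + (j + 1) = k + j from by omega, hgetR j])]
      exact List.map_congr_left (fun j hj => by simp only [Function.comp_apply, Nat.succ_eq_add_one]; omega)
    rw [htail, show k - 1 + 0 = k - 1 from by omega]

theorem sums_shift (rs : List Int) (x y : Int) :
    sums (x + y) rs = (sums x rs).map (· + y) := by
  induction rs generalizing x with
  | nil => simp [sums]
  | cons a t ih => simp [sums, ← ih]; ring_nf

theorem sums_length (x : Int) (rs : List Int) : (sums x rs).length = rs.length + 1 := by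
  induction rs generalizing x with
  | nil => simp [sums]
  | cons a t ih => simp [sums, ih]

theorem sums_getD (rs : List Int) (x : Int) (i : Nat) (h : i ≤ rs.length) :
    (sums x rs).getD i 0 = x + (rs.take i).sum := by
  induction rs generalizing x i with
  | nil =>
    simp at h; subst h; simp [sums]
  | cons a t ih =>
    cases i with
    | zero => simp [sums]
    | succ j =>
      simp only [sums, List.getD_cons_succ, List.take_succ_cons, List.sum_cons]
      rw [ih (x + a) j (by simpa using h)]
      ring

theorem main_arr (l : List Char) (hl : l ≠ []) :
    ((0 : Int) :: (ABnds l).map (fun j : Nat => (j : Int) + 1) ++ [(l.length : Int)]) =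
      sums 0 (runsOf l) := by
  suffices H : ∀ (N : Nat) (l : List Char), l.length ≤ N → l ≠ [] →
      ((0 : Int) :: (ABnds l).map (fun j : Nat => (j : Int) + 1) ++ [(l.length : Int)]) =
        sums 0 (runsOf l) from H l.length l le_rfl hl
  intro N
  induction N with
  | zero => intro l h hne; cases l <;> simp_all
  | succ N ih =>
    intro l hlen hne
    obtain ⟨c, t, rfl⟩ : ∃ c t, l = c :: t := by
      cases l with
      | nil => exact absurd rfl hne
      | cons c t => exact ⟨c, t, rfl⟩
    set k := ((c :: t).takeWhile (fun x => x = c)).length with hk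
    set s := (c :: t).dropWhile (fun x => x = c) with hs
    have hdecomp : (c :: t) = List.replicate k c ++ s := by
      conv_lhs => rw [← List.takeWhile_append_dropWhile (p := fun x => decide (x = c)) (l := c :: t)]
      congr 1
      have : ∀ x ∈ (c :: t).takeWhile (fun x => decide (x = c)), x = c := by
        intro x hx
        simpa using List.mem_takeWhile_imp hx
      rw [List.eq_replicate_of_mem this]
    have hk1 : 1 ≤ k := by
      rw [hk]
      simp
    have hhead : s.head? ≠ some c := by
      intro hcon
      cases hss : s with
      | nil => rw [hss] at hcon; simp at hcon
      | cons d t' =>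
        rw [hss] at hcon
        simp at hcon
        have := List.head?_dropWhile_not (fun x => decide (x = c)) (c :: t)
        rw [← hs, hss] at this
        simp [hcon] at this
    rw [hdecomp, ABnds_replicate k c s hk1 hhead, runsOf_replicate k c s hk1 hhead]
    by_cases hsnil : s = []
    · rw [if_pos hsnil, hsnil]
      simp [runsOf, sums]
    · rw [if_neg hsnil]
      have hslen : s.length ≤ N := by
        have h2 := congrArg List.length hdecomp
        simp only [List.length_append, List.length_replicate, List.length_cons] at h2 hlen
        omega
      have IH := ih s hslen hsnil
      have : sums (0 : Int) ((k : Int) :: runsOf s) = 0 :: sums ((0 : Int) + (k : Int)) (runsOf s) := rfl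
      rw [this, sums_shift (runsOf s) 0 (k : Int), ← IH]
      simp only [List.map_cons, List.map_map, List.map_append, List.length_append, List.length_replicate]
      simp only [List.map_nil]
      rw [List.cons_append]
      refine congrArg (List.cons 0) ?_
      refine congrArg₂ List.cons (by omega) ?_
      refine congrArg₂ (fun (u v : List Int) => u ++ v) ?_ ?_
      · apply List.map_congr_left
        intro j hj
        simp only [Function.comp_apply]
        push_cast
        ring
      · norm_num
        push_cast
        ring

theorem pairsAllEq_iff (rs : List Int) (t : Nat) (h : rs.length = 2 * t) :
    pairsAllEq rs = decide (∀ k < t, rs.getD (2 * k) 0 = rs.getD (2 * k + 1) 0) := by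
  induction t generalizing rs with
  | zero =>
    have : rs = [] := by cases rs <;> simp_all
    subst this; simp [pairsAllEq]
  | succ t' ih =>
    match rs, h with
    | a :: b :: r, h =>
      have hr : r.length = 2 * t' := by simp at h; omega
      rw [show pairsAllEq (a :: b :: r) = ((a == b) && pairsAllEq r) from rfl]
      rw [ih r hr]
      by_cases hab : a = b
      · subst hab
        simp only [beq_self_eq_true, Bool.true_and, decide_eq_decide]
        constructor
        · intro hall k hk
          cases k with
          | zero => simp
          | succ j =>
            have := hall j (by omega)
            simpa [Nat.mul_succ, Nat.mul_add] using this
        · intro hall j hj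
          have := hall (j + 1) (by omega)
          simpa [Nat.mul_add] using this
      · have : (a == b) = false := by simpa using hab
        rw [this, Bool.false_and]
        symm
        simp only [decide_eq_false_iff_not]
        intro hall
        exact hab (by simpa using hall 0 (by omega))

-- step 1: A's boundary filter, rebased to Nat indices
theorem A_filter (l : List Char) :
    (PySem.List.pyRange 1 ((l.length : Int)) 1).filter
      (fun i => decide (PySem.List.pyGetD l i ' ' ≠ PySem.List.pyGetD l (i - 1) ' ')) =
      (ABnds l).map (fun j : Nat => (j : Int) + 1) := by
  rw [PySem.List.pyRange_one, List.filter_map]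
  rw [show ((l.length : Int) - 1).toNat = l.length - 1 from by omega]
  unfold ABnds
  rw [List.filter_congr (q := fun j => decide (l.getD (j + 1) ' ' ≠ l.getD j ' '))
      (fun j hj => by
        show decide _ = decide _
        rw [decide_eq_decide]
        show PySem.List.pyGetD l (1 + (j : Int)) ' ' ≠ PySem.List.pyGetD l (1 + (j : Int) - 1) ' ' ↔ _
        rw [show (1 : Int) + (j : Nat) = ((j + 1 : Nat) : Int) from by push_cast; ring,
            PySem.List.pyGetD_natCast,
            show ((j + 1 : Nat) : Int) - 1 = ((j : Nat) : Int) from by push_cast; ring,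
            PySem.List.pyGetD_natCast])]
  apply List.map_congr_left
  intro j hj
  ring

theorem sumdiff (rs : List Int) (i : Nat) (h : i < rs.length) :
    (sums 0 rs).getD (i + 1) 0 - (sums 0 rs).getD i 0 = rs.getD i 0 := by
  rw [sums_getD rs 0 (i + 1) (by omega), sums_getD rs 0 i (by omega),
      List.sum_take_succ rs i h]
  rw [List.getD_eq_getElem?_getD, List.getElem?_eq_getElem h]
  simp

theorem A_eq_body (txt : String) : same_length txt = Abody txt.toList := by
  unfold same_length Abody
  rw [PySem.Str.len_eq]

theorem A_eq (l : List Char) : Abody l = canon l := by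
  unfold Abody
  dsimp only
  rw [PySem.List.foldl_append_ite_eq_filter
      (p := fun i => PySem.List.pyGetD l i ' ' ≠ PySem.List.pyGetD l (i - 1) ' ')]
  rw [A_filter l]
  by_cases hnil : l = []
  · rw [hnil]
    norm_num [ABnds, canon, runsOf, PySem.Int.mod]
  · have harr2 : ([(0 : Int)] ++ (ABnds l).map (fun j : Nat => (j : Int) + 1)) ++ [(l.length : Int)] =
        sums 0 (runsOf l) := by
      rw [← main_arr l hnil]
      simp
    rw [harr2]
    set rs := runsOf l with hrs
    have hlen2 : ((sums 0 rs).length : Int) = ((rs.length + 1 : Nat) : Int) := by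
      rw [sums_length]
    rw [hlen2]
    have hmod : ∀ m : Nat, PySem.Int.mod ((m : Int)) 2 = ((m % 2 : Nat) : Int) := by
      intro m
      exact_mod_cast PySem.Int.mod_natCast m 2
    have hrsne : rs ≠ [] := runsOf_ne_nil l hnil
    unfold canon ch
    rw [if_neg hnil, ← hrs]
    by_cases hpar : rs.length % 2 = 0
    · -- parity passes: arr's length is odd and both sides run the pair check
      rw [if_neg (by rw [hmod]; omega), if_pos hpar]
      obtain ⟨t, ht⟩ : ∃ t, rs.length = 2 * t := ⟨rs.length / 2, by omega⟩
      have ht1 : 1 ≤ t := by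
        have : rs.length ≠ 0 := by simpa using hrsne
        omega
      rw [pairsAllEq_iff rs t ht, ht]
      rw [PySem.List.foldl_congr_mem
          (f := fun (ok : Bool) (i : Int) => if PySem.List.pyGetD (sums 0 rs) i 0 - PySem.List.pyGetD (sums 0 rs) (i - 1) 0 ≠
              PySem.List.pyGetD (sums 0 rs) (i + 1) 0 - PySem.List.pyGetD (sums 0 rs) i 0 then false else ok)
          (g := fun (ok : Bool) (i : Int) => if (decide (PySem.List.pyGetD (sums 0 rs) i 0 - PySem.List.pyGetD (sums 0 rs) (i - 1) 0 ≠
              PySem.List.pyGetD (sums 0 rs) (i + 1) 0 - PySem.List.pyGetD (sums 0 rs) i 0)) = true then false else ok)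
          (l := PySem.List.pyRange 1 ((2 * t + 1 : Nat) : Int) 2) (init := true)
          (fun acc x _ => by simp)]
      rw [PySem.List.foldl_if_false_eq]
      rw [Bool.true_and]
      rw [PySem.List.pyRange_of_pos 1 ((2 * t + 1 : Nat) : Int) (by norm_num)]
      rw [if_pos (by push_cast; omega)]
      rw [show ((((2 * t + 1 : Nat) : Int) - 1 + 2 - 1) / 2).toNat = t from by omega]
      rw [List.any_map]
      rw [PySem.List.any_congr_mem
          (g := fun k : Nat => decide (rs.getD (2 * k) 0 ≠ rs.getD (2 * k + 1) 0))
          (fun k hk => by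
            rw [List.mem_range] at hk
            show decide _ = decide _
            rw [decide_eq_decide]
            show PySem.List.pyGetD (sums 0 rs) (1 + 2 * (k : Int)) 0 -
                  PySem.List.pyGetD (sums 0 rs) (1 + 2 * (k : Int) - 1) 0 ≠
                PySem.List.pyGetD (sums 0 rs) (1 + 2 * (k : Int) + 1) 0 -
                  PySem.List.pyGetD (sums 0 rs) (1 + 2 * (k : Int)) 0 ↔ _
            rw [show (1 : Int) + 2 * (k : Int) = ((2 * k + 1 : Nat) : Int) from by push_cast; ring,
                show ((2 * k + 1 : Nat) : Int) - 1 = ((2 * k : Nat) : Int) from by push_cast; ring,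
                show ((2 * k + 1 : Nat) : Int) + 1 = ((2 * k + 2 : Nat) : Int) from by push_cast; ring,
                PySem.List.pyGetD_natCast, PySem.List.pyGetD_natCast, PySem.List.pyGetD_natCast]
            rw [show (2 * k + 1) = (2 * k) + 1 from rfl, sumdiff rs (2 * k) (by omega)]
            rw [show (2 * k + 2) = (2 * k + 1) + 1 from rfl, sumdiff rs (2 * k + 1) (by omega)])]
      by_cases hall : ∀ k < t, rs.getD (2 * k) 0 = rs.getD (2 * k + 1) 0
      · rw [decide_eq_true hall]
        have : (List.range t).any (fun k => decide (rs.getD (2 * k) 0 ≠ rs.getD (2 * k + 1) 0)) = false := by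
          rw [List.any_eq_false]
          intro k hk
          rw [List.mem_range] at hk
          simpa using hall k hk
        rw [this]
        rfl
      · rw [decide_eq_false hall]
        push_neg at hall
        obtain ⟨k, hk, hne⟩ := hall
        have : (List.range t).any (fun k => decide (rs.getD (2 * k) 0 ≠ rs.getD (2 * k + 1) 0)) = true := by
          rw [List.any_eq_true]
          exact ⟨k, by simpa [List.mem_range] using hk, by simpa using hne⟩
        rw [this]
        rfl
    · -- parity fails: both return false
      rw [if_pos (by rw [hmod]; omega), if_neg hpar]

-- ===== B-side lemmas =====

theorem dropWhile_eq_drop_tw (p : Char → Bool) (l : List Char) :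
    l.dropWhile p = l.drop (l.takeWhile p).length := by
  induction l with
  | nil => rfl
  | cons a t ih =>
    by_cases h : p a = true <;> simp [List.dropWhile_cons, List.takeWhile_cons, h, ih]

-- characterization of the inner while loop
theorem runGo_spec (s : List Char) (c : Char) (j : Nat) (h : j ≤ s.length) :
    runGo s c j = j + ((s.drop j).takeWhile (fun x => x = c)).length := by
  by_cases hlt : j < s.length
  · rw [runGo, dif_pos hlt, List.drop_eq_getElem_cons hlt, List.getD_eq_getElem s ' ' hlt]
    by_cases he : s[j] = c
    · rw [if_pos he, runGo_spec s c (j + 1) (by omega)]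
      simp [List.takeWhile_cons, he]
      omega
    · rw [if_neg he]
      simp [List.takeWhile_cons, he]
  · have hj : j = s.length := by omega
    rw [runGo, dif_neg hlt, hj]
    simp
termination_by s.length - j

theorem pairsAllEq_cons (a b : Int) (t : List Int) :
    pairsAllEq (a :: b :: t) = ((a == b) && pairsAllEq t) := rfl

theorem runEnd_spec (s : List Char) (i : Nat) (h : i < s.length) :
    runEnd s i = (i + 1) + ((s.drop (i + 1)).takeWhile (fun x => x = s[i])).length := by
  unfold runEnd
  rw [List.getD_eq_getElem s ' ' h, runGo_spec s s[i] (i + 1) (by omega)]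

-- decomposition of runsOf at the head run
theorem runsOf_head (c : Char) (t : List Char) :
    runsOf (c :: t) =
      (((t.takeWhile (fun x => x = c)).length + 1 : Nat) : Int) ::
        runsOf (t.dropWhile (fun x => x = c)) := by
  have hdecomp : (c :: t) = List.replicate ((t.takeWhile (fun x => x = c)).length + 1) c ++
      t.dropWhile (fun x => x = c) := by
    rw [List.replicate_succ, List.cons_append]
    refine congrArg (List.cons c) ?_
    conv_lhs => rw [← List.takeWhile_append_dropWhile (p := fun x => decide (x = c)) (l := t)]
    congr 1
    have : ∀ x ∈ t.takeWhile (fun x => decide (x = c)), x = c := by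
      intro x hx
      simpa using List.mem_takeWhile_imp hx
    rw [List.eq_replicate_of_mem this]
    simp
  have hhead : (t.dropWhile (fun x => x = c)).head? ≠ some c := by
    intro hcon
    cases hss : t.dropWhile (fun x => x = c) with
    | nil => rw [hss] at hcon; simp at hcon
    | cons d t' =>
      rw [hss] at hcon
      simp at hcon
      have := List.head?_dropWhile_not (fun x => decide (x = c)) t
      rw [hss] at this
      simp [hcon] at this
  conv_lhs => rw [hdecomp]
  rw [runsOf_replicate _ c _ (by omega) hhead]

-- the outer while loop computes ch on the remaining suffix
theorem bLoop_eq (s : List Char) (i : Nat) (h : i ≤ s.length) :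
    bLoop s i = ch (s.drop i) := by
  by_cases hlt : i < s.length
  · have hdropi : s.drop i = s[i] :: s.drop (i + 1) := List.drop_eq_getElem_cons hlt
    set c := s[i] with hc
    set u := ((s.drop (i + 1)).takeWhile (fun x => x = c)).length with hu
    have hul : u ≤ s.length - (i + 1) := by
      have := (List.takeWhile_prefix (l := s.drop (i + 1)) (fun x => decide (x = c))).length_le
      simp only [List.length_drop] at this
      omega
    have hj : runEnd s i = (i + 1) + u := runEnd_spec s i hlt
    have hdropj : s.drop (runEnd s i) = (s.drop (i + 1)).dropWhile (fun x => x = c) := by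
      rw [hj, dropWhile_eq_drop_tw, ← hu, List.drop_drop]
    have hrunsi : runsOf (s.drop i) = ((u + 1 : Nat) : Int) :: runsOf (s.drop (runEnd s i)) := by
      rw [hdropi, runsOf_head, hdropj]
    rw [bLoop, dif_pos hlt]
    by_cases hend : runEnd s i = s.length
    · rw [if_pos hend]
      have : s.drop (runEnd s i) = [] := by rw [hend]; simp
      rw [this] at hrunsi
      unfold ch
      rw [hrunsi]
      simp [runsOf]
    · rw [if_neg hend]
      have hjlt : runEnd s i < s.length := by omega
      have hdropj2 : s.drop (runEnd s i) = s[runEnd s i] :: s.drop (runEnd s i + 1) :=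
        List.drop_eq_getElem_cons hjlt
      set d := s[runEnd s i] with hd
      set u2 := ((s.drop (runEnd s i + 1)).takeWhile (fun x => x = d)).length with hu2
      have hu2l : u2 ≤ s.length - (runEnd s i + 1) := by
        have := (List.takeWhile_prefix (l := s.drop (runEnd s i + 1)) (fun x => decide (x = d))).length_le
        simp only [List.length_drop] at this
        omega
      have hm : runEnd s (runEnd s i) = (runEnd s i + 1) + u2 := by
        rw [runEnd_spec s (runEnd s i) hjlt, ← hd, ← hu2]
      have hdropm : s.drop (runEnd s (runEnd s i)) = (s.drop (runEnd s i + 1)).dropWhile (fun x => x = d) := by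
        rw [hm, dropWhile_eq_drop_tw, ← hu2, List.drop_drop]
      have hrunsj : runsOf (s.drop (runEnd s i)) =
          ((u2 + 1 : Nat) : Int) :: runsOf (s.drop (runEnd s (runEnd s i))) := by
        rw [hdropj2, runsOf_head, hdropm]
      have hIH : bLoop s (runEnd s (runEnd s i)) = ch (s.drop (runEnd s (runEnd s i))) :=
        bLoop_eq s (runEnd s (runEnd s i)) (by omega)
      unfold ch
      simp only [hrunsi, hrunsj, pairsAllEq_cons, List.length_cons]
      by_cases heq : runEnd s (runEnd s i) - runEnd s i = runEnd s i - i
      · rw [if_neg (by omega), hIH]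
        have huu : u = u2 := by omega
        rw [huu, beq_self_eq_true, Bool.true_and]
        have hmod2 : ((runsOf (s.drop (runEnd s (runEnd s i)))).length + 1 + 1) % 2 =
            (runsOf (s.drop (runEnd s (runEnd s i)))).length % 2 := by omega
        simp only [hmod2]
        rfl
      · rw [if_pos (by omega)]
        have hkk : ¬ (((u + 1 : Nat) : Int) = ((u2 + 1 : Nat) : Int)) := by
          intro hcon
          have : (u + 1 : Nat) = (u2 + 1 : Nat) := by exact_mod_cast hcon
          omega
        rw [beq_eq_false_iff_ne.mpr hkk, Bool.false_and]
        split <;> rfl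
  · have : i = s.length := by omega
    rw [bLoop, dif_neg hlt, this]
    simp [ch, runsOf, pairsAllEq]
termination_by s.length - i
decreasing_by
  have h1 : i + 1 ≤ runEnd s i := runGo_ge s (s.getD i ' ') (i + 1)
  have h2 : runEnd s i + 1 ≤ runEnd s (runEnd s i) := runGo_ge s (s.getD (runEnd s i) ' ') (runEnd s i + 1)
  omega

theorem B_eq (txt : String) : same_length_alt txt = canon txt.toList := by
  unfold same_length_alt canon
  by_cases hnil : txt.toList = []
  · rw [hnil]; simp
  · have hlen : txt.toList.length ≠ 0 := by simpa using hnil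
    rw [if_neg hlen, if_neg hnil, bLoop_eq txt.toList 0 (by omega)]
    simp

-- ===== VERDICT (by name: the statement is the Claim_ definition above) =====
theorem same_length_spec : Claim_equal_same_length := by
  intro txt _
  unfold Spec_same_length
  rw [A_eq_body, A_eq, B_eq]
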